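-- pv_equiv track=rewrite | github.com/muhd-ali/ProblemSolving | Interviewing/google/sol_2.py | binarySearchNearest
-- ===== SOURCE A (Python) =====
-- def binarySearchNearest(data, val):
--     highIndex = len(data)-1
--     lowIndex = 0
--     while highIndex > lowIndex:
--         index = int((highIndex + lowIndex) / 2)
--         sub = data[index]
--         if data[lowIndex] == val:
--             return [lowIndex, lowIndex]
--         elif sub == val:
--             return [index, index]
--         elif data[highIndex] == val:
--             return [highIndex, highIndex]
--         elif sub > val:
--             if highIndex == index:
--                 return sorted([highIndex, lowIndex])
--             highIndex = index
--         else: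
--             if lowIndex == index:
--                 return sorted([highIndex, lowIndex])
--             lowIndex = index
--     return sorted([highIndex, lowIndex])
-- ===== SOURCE B (Python) =====
-- def binarySearchNearest(data, val):
--     # Recursive decomposition: helper on (low, high); candidate scan for the
--     # equality checks; min/max instead of sorted(); unified terminal when the
--     # interval would not shrink.
--     def go(low, high):
--         if high <= low:
--             return [min(low, high), max(low, high)]
--         mid = (low + high) // 2
--         for i in (low, mid, high):
--             if data[i] == val:
--                 return [i, i]
--         nlow, nhigh = (low, mid) if data[mid] > val else (mid, high)
--         if (nlow, nhigh) == (low, high):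
--             return [min(low, high), max(low, high)]
--         return go(nlow, nhigh)
--     return go(0, len(data) - 1)
-- ===== Notes on version B (the rewrite author's own statement) =====
-- stated objective: alternative
-- what changed: The while-loop with mutable lowIndex/highIndex and a chain of per-bound branches is replaced by a recursive helper on (low, high) that scans the three candidate indices (low, mid, high) for an exact match, picks the next half-interval as a pair, and terminates with [min, max] whenever the interval would not shrink.
import Mathlib
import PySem

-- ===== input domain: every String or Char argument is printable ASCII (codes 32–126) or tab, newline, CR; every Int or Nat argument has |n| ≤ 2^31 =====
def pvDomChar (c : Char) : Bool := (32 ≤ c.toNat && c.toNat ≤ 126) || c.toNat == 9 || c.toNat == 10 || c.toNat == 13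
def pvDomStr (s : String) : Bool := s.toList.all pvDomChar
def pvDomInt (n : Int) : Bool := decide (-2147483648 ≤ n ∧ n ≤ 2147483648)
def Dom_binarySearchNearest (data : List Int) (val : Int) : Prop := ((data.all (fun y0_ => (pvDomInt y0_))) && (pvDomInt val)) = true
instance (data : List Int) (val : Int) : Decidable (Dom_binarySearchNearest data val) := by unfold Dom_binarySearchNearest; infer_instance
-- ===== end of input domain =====

-- ===== PORT A =====
-- B is an alternative recursive decomposition of the same bracket search (same cost); return-value equivalence only.
-- Loop of A ported as a tail-recursive helper over the same state (lowIndex, highIndex).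
-- data[...] is ported with pyGetD 0: every subscript A performs lies in range (0 <= lowIndex <= index <= highIndex < len).
-- int((highIndex+lowIndex)/2) is PySem.Int.truncdiv (exact here: indices are far below 2^53).

-- termination helper for bsnLoop (cited in its decreasing_by)
theorem tdiv_mid_bounds (l h : Int) (hle : l ≤ h) :
    l ≤ (h + l).tdiv 2 ∧ (h + l).tdiv 2 ≤ h := by
  by_cases hs : 0 ≤ h + l
  · rw [Int.tdiv_eq_ediv_of_nonneg hs]; omega
  · have hneg : (h + l).tdiv 2 = -((-(h + l)).tdiv 2) := by
      rw [Int.neg_tdiv, neg_neg]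
    rw [hneg, Int.tdiv_eq_ediv_of_nonneg (by omega : (0:Int) ≤ -(h + l))]; omega

def bsnLoop (data : List Int) (val lowIndex highIndex : Int) : List Int :=
  if _h : highIndex > lowIndex then
    let index := PySem.Int.truncdiv (highIndex + lowIndex) 2
    let sub := PySem.List.pyGetD data index 0
    if PySem.List.pyGetD data lowIndex 0 == val then [lowIndex, lowIndex]
    else if sub == val then [index, index]
    else if PySem.List.pyGetD data highIndex 0 == val then [highIndex, highIndex]
    else if sub > val then
      if _h2 : highIndex == index then PySem.List.sorted [highIndex, lowIndex] (fun x => x) false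
      else bsnLoop data val lowIndex index
    else
      if _h3 : lowIndex == index then PySem.List.sorted [highIndex, lowIndex] (fun x => x) false
      else bsnLoop data val index highIndex
  else PySem.List.sorted [highIndex, lowIndex] (fun x => x) false
  termination_by (highIndex - lowIndex).toNat
  decreasing_by
  · have hb : lowIndex ≤ PySem.Int.truncdiv (highIndex + lowIndex) 2 ∧
        PySem.Int.truncdiv (highIndex + lowIndex) 2 ≤ highIndex := by
      simpa [PySem.Int.truncdiv] using tdiv_mid_bounds lowIndex highIndex (le_of_lt _h)
    simp only [beq_iff_eq] at _h2
    omega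
  · have hb : lowIndex ≤ PySem.Int.truncdiv (highIndex + lowIndex) 2 ∧
        PySem.Int.truncdiv (highIndex + lowIndex) 2 ≤ highIndex := by
      simpa [PySem.Int.truncdiv] using tdiv_mid_bounds lowIndex highIndex (le_of_lt _h)
    simp only [beq_iff_eq] at _h3
    omega

def bsnGo (data : List Int) (val low high : Int) : List Int :=
  if _h : high ≤ low then [min low high, max low high]
  else
    let mid := PySem.Int.floordiv (low + high) 2
    match [low, mid, high].find? (fun i => PySem.List.pyGetD data i 0 == val) with
    | some i => [i, i]
    | none =>
      let p := if PySem.List.pyGetD data mid 0 > val then (low, mid) else (mid, high)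
      if _hp : p.1 == low && p.2 == high then [min low high, max low high]
      else bsnGo data val p.1 p.2
  termination_by (high - low).toNat
  decreasing_by
    have hlt : low < high := not_le.mp _h
    have hmv : mid = PySem.Int.floordiv (low + high) 2 := rfl
    have hb : low ≤ mid ∧ mid ≤ high := by
      rw [hmv]; exact PySem.Int.floordiv_two_mid_bounds (le_of_lt hlt)
    have hpv : p = if PySem.List.pyGetD data mid 0 > val then (low, mid) else (mid, high) := rfl
    simp only [Bool.and_eq_true, beq_iff_eq] at _hp
    by_cases hc : PySem.List.pyGetD data mid 0 > val
    · rw [if_pos hc] at hpv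
      rw [hpv] at _hp
      simp at _hp
      rw [dif_pos hc]
      simp only []
      omega
    · rw [if_neg hc] at hpv
      rw [hpv] at _hp
      simp at _hp
      rw [dif_neg hc]
      simp only []
      omega

def binarySearchNearest (data : List Int) (val : Int) : List Int :=
  bsnLoop data val 0 ((data.length : Int) - 1)

def binarySearchNearest_alt (data : List Int) (val : Int) : List Int :=
  bsnGo data val 0 ((data.length : Int) - 1)

-- ===== PRECONDITION & SPEC =====
def Spec_binarySearchNearest (data : List Int) (val : Int) (out : List Int) : Prop := out = binarySearchNearest_alt data val
instance (data : List Int) (val : Int) (out : List Int) : Decidable (Spec_binarySearchNearest data val out) := by unfold Spec_binarySearchNearest; infer_instance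

-- ===== CLAIM (what is proved, stated in full; the proofs are below) =====
def Claim_equal_binarySearchNearest : Prop := ∀ (data : List Int) (val : Int), Dom_binarySearchNearest data val → Spec_binarySearchNearest data val (binarySearchNearest data val)

-- ===== LEMMAS AND PROOFS =====

-- sorted() of a two-element list is [min, max]
theorem sorted_pair (a b : Int) : PySem.List.sorted [a, b] (fun x => x) false = [min a b, max a b] := by
  simp [PySem.List.sorted_eq_foldl_insertBy, PySem.List.insertBy]
  split_ifs <;> simp [min_def, max_def] <;> omega

-- A's int((h+l)/2) equals B's (l+h)//2 on nonnegative sums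
theorem mid_eq (l h : Int) (hl : 0 ≤ l + h) :
    PySem.Int.truncdiv (h + l) 2 = PySem.Int.floordiv (l + h) 2 := by
  simp only [PySem.Int.truncdiv, PySem.Int.floordiv, add_comm h l]
  rw [Int.tdiv_eq_ediv_of_nonneg hl, Int.fdiv_eq_ediv]; omega

theorem loop_eq_go (data : List Int) (val : Int) :
    ∀ (n : Nat) (low high : Int), (high - low).toNat ≤ n → 0 ≤ low →
      bsnLoop data val low high = bsnGo data val low high := by
  intro n
  induction n with
  | zero =>
    intro low high hn hl
    have hle : high ≤ low := by omega
    rw [bsnLoop, bsnGo]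
    rw [dif_neg (not_lt.mpr hle), dif_pos hle, sorted_pair]
    rw [min_comm, max_comm]
  | succ n ih =>
    intro low high hn hl
    by_cases hle : high ≤ low
    · rw [bsnLoop, bsnGo]
      rw [dif_neg (not_lt.mpr hle), dif_pos hle, sorted_pair]
      rw [min_comm, max_comm]
    · have hlt : low < high := not_le.mp hle
      have hm := mid_eq low high (by omega)
      have hb := PySem.Int.floordiv_two_mid_bounds (le_of_lt hlt)
      set mid := PySem.Int.floordiv (low + high) 2 with hmid
      rw [bsnLoop, bsnGo]
      rw [dif_pos hlt, dif_neg hle]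
      simp only [hm, ← hmid]
      by_cases e1 : PySem.List.pyGetD data low 0 = val
      · rw [List.find?_cons_of_pos (p := fun i => PySem.List.pyGetD data i 0 == val) (a := low) (l := [mid, high]) (beq_iff_eq.mpr e1), if_pos (beq_iff_eq.mpr e1)]
      · have c1 : ¬((PySem.List.pyGetD data low 0 == val) = true) := by
          simp only [beq_iff_eq]; exact e1
        rw [List.find?_cons_of_neg (p := fun i => PySem.List.pyGetD data i 0 == val) (a := low) (l := [mid, high]) c1, if_neg c1]
        by_cases e2 : PySem.List.pyGetD data mid 0 = val
        · rw [List.find?_cons_of_pos (p := fun i => PySem.List.pyGetD data i 0 == val) (a := mid) (l := [high]) (beq_iff_eq.mpr e2), if_pos (beq_iff_eq.mpr e2)]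
        · have c2 : ¬((PySem.List.pyGetD data mid 0 == val) = true) := by
            simp only [beq_iff_eq]; exact e2
          rw [List.find?_cons_of_neg (p := fun i => PySem.List.pyGetD data i 0 == val) (a := mid) (l := [high]) c2, if_neg c2]
          by_cases e3 : PySem.List.pyGetD data high 0 = val
          · rw [List.find?_cons_of_pos (p := fun i => PySem.List.pyGetD data i 0 == val) (a := high) (l := []) (beq_iff_eq.mpr e3), if_pos (beq_iff_eq.mpr e3)]
          · have c3 : ¬((PySem.List.pyGetD data high 0 == val) = true) := by
              simp only [beq_iff_eq]; exact e3
            rw [List.find?_cons_of_neg (p := fun i => PySem.List.pyGetD data i 0 == val) (a := high) (l := []) c3, List.find?_nil, if_neg c3]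
            by_cases hc : PySem.List.pyGetD data mid 0 > val
            · rw [if_pos hc, if_pos hc]
              by_cases hh : high = mid
              · rw [dif_pos (beq_iff_eq.mpr hh),
                    dif_pos (show ((low, mid).1 == low && (low, mid).2 == high) = true by
                      simp only [Bool.and_eq_true, beq_iff_eq, true_and]; exact hh.symm)]
                rw [sorted_pair, min_comm, max_comm]
              · rw [dif_neg (show ¬ ((high == mid) = true) by simp only [beq_iff_eq]; exact hh),
                    dif_neg (show ¬ (((low, mid).1 == low && (low, mid).2 == high) = true) by
                      simp only [Bool.and_eq_true, beq_iff_eq, not_and]; exact fun _ h2 => hh h2.symm)]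
                exact ih low mid (by omega) hl
            · rw [if_neg hc, if_neg hc]
              by_cases hh : low = mid
              · rw [dif_pos (beq_iff_eq.mpr hh),
                    dif_pos (show ((mid, high).1 == low && (mid, high).2 == high) = true by
                      simp only [Bool.and_eq_true, beq_iff_eq, and_true]; exact hh.symm)]
                rw [sorted_pair, min_comm, max_comm]
              · rw [dif_neg (show ¬ ((low == mid) = true) by simp only [beq_iff_eq]; exact hh),
                    dif_neg (show ¬ (((mid, high).1 == low && (mid, high).2 == high) = true) by
                      simp only [Bool.and_eq_true, beq_iff_eq, not_and]; exact fun h1 _ => hh h1.symm)]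
                exact ih mid high (by omega) (by omega)

-- ===== VERDICT (by name: the statement is the Claim_ definition above) =====
theorem binarySearchNearest_spec : Claim_equal_binarySearchNearest := by
  intro data val _
  unfold Spec_binarySearchNearest binarySearchNearest binarySearchNearest_alt
  exact loop_eq_go data val _ 0 ((data.length : Int) - 1) le_rfl le_rfl
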